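-- pv_equiv track=rewrite | github.com/njagua3/Bot_arb | arbitrage_bot/scripts/seed_team_aliases.py | _merge_pairs_into_json_map
-- ===== SOURCE A (Python) =====
-- from typing import Iterable, Tuple, Dict, Any, List, DefaultDict
-- from collections import defaultdict
--
-- def _merge_pairs_into_json_map(pairs: Iterable[Tuple[str, str]], existing: Dict[str, List[str]]) -> Dict[str, List[str]]:
--     """
--     Merge (alias, team) into {team: [aliases...]}, dedupe & sort.
--     """
--     merged: DefaultDict[str, set] = defaultdict(set)
--     for team, aliases in existing.items():
--         for a in aliases:
--             if a.strip() and a.strip() != team.strip():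
--                 merged[team].add(a.strip())
--
--     for alias, team in pairs:
--         alias = alias.strip()
--         team = team.strip()
--         if not alias or not team or alias == team:
--             continue
--         merged[team].add(alias)
--
--     # back to lists (sorted)
--     return {team: sorted(list(aliases), key=str.lower) for team, aliases in merged.items()}
-- ===== SOURCE B (Python) =====
-- def _merge_pairs_into_json_map(pairs, existing):
--     """
--     Merge (alias, team) into {team: [aliases...]}, dedupe & sort.
--     """
--     contribs = [(team, a.strip())
--                 for team, aliases in existing.items()
--                 for a in aliases
--                 if a.strip() and a.strip() != team.strip()]
--     contribs += [(team.strip(), alias.strip())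
--                  for alias, team in pairs
--                  if alias.strip() and team.strip() and alias.strip() != team.strip()]
--     groups = {}
--     for team, alias in contribs:
--         groups.setdefault(team, []).append(alias)
--     return {team: _dedup_sorted(lst) for team, lst in groups.items()}
--
--
-- def _dedup_sorted(vals):
--     vals = sorted(vals, key=str.lower)
--     return [x for x, prev in zip(vals, [None] + vals) if x != prev]
-- ===== Notes on version B (the rewrite author's own statement) =====
-- stated objective: alternative
-- what changed: Instead of incrementally filling a defaultdict(set) inside the guarded loops, B first flattens both inputs into one list of (team, stripped-alias) contributions via comprehensions, groups that list per team in a single setdefault pass keeping duplicates, and finally sorts each group case-insensitively and dedups it by a zip-with-predecessor comparison.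
-- outside the precondition, e.g. on _merge_pairs_into_json_map([('A', 't'), ('a', 't')], {}): A returns {'t': ['a', 'A']}, B returns {'t': ['A', 'a']}
import Mathlib
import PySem

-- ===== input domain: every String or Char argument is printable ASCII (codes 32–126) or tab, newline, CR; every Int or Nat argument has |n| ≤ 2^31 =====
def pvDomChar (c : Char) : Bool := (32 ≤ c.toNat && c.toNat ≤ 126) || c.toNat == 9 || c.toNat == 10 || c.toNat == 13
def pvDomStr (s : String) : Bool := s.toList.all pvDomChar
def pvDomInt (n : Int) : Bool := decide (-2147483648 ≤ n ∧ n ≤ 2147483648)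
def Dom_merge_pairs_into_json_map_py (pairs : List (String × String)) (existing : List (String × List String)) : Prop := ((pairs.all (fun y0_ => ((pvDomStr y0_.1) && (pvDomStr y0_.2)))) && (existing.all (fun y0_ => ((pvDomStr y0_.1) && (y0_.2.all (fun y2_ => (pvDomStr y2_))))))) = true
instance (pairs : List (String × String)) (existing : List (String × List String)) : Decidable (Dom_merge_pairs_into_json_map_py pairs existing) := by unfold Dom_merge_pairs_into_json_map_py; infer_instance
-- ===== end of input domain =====

-- B replaces A's incremental defaultdict(set) with a flat list of (team, stripped-alias)
-- contributions built by comprehensions, grouped per team in one setdefault pass, each group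
-- then sorted and deduped by comparison with its predecessor (objective: alternative).

-- ===== PORT A =====
def merge_pairs_into_json_map_py (pairs : List (String × String)) (existing : List (String × List String)) : List (String × List String) :=
  -- merged: DefaultDict[str, set]; for team, aliases in existing.items(): for a in aliases: …
  let merged : PySem.Dict String (PySem.Set String) :=
    existing.foldl (fun d p =>
      p.2.foldl (fun d a =>
        if PySem.Str.strip a ≠ "" ∧ PySem.Str.strip a ≠ PySem.Str.strip p.1 then
          d.modify p.1 PySem.Set.empty (fun s => PySem.Set.add s (PySem.Str.strip a))
        else d) d) PySem.Dict.empty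
  -- for alias, team in pairs: alias = alias.strip(); team = team.strip(); if … continue; merged[team].add(alias)
  -- (the two assignments are inlined: strip is pure, the values are identical)
  let merged :=
    pairs.foldl (fun d p =>
      if PySem.Str.strip p.1 = "" ∨ PySem.Str.strip p.2 = "" ∨ PySem.Str.strip p.1 = PySem.Str.strip p.2
      then d
      else d.modify (PySem.Str.strip p.2) PySem.Set.empty (fun s => PySem.Set.add s (PySem.Str.strip p.1))) merged
  -- {team: sorted(list(aliases), key=str.lower) for team, aliases in merged.items()}
  merged.items.map (fun p => (p.1, PySem.List.sorted p.2 (fun s => PySem.Str.lower s) false))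

-- ===== PORT B =====
-- B-side helper: the two list comprehensions building `contribs` (also used by Pre_ below)
def pvContribs (pairs : List (String × String)) (existing : List (String × List String)) : List (String × String) :=
  (existing.flatMap (fun p => p.2.filterMap (fun a =>
      if PySem.Str.strip a ≠ "" ∧ PySem.Str.strip a ≠ PySem.Str.strip p.1
      then some (p.1, PySem.Str.strip a) else none)))
  ++ pairs.filterMap (fun p =>
      if PySem.Str.strip p.1 = "" ∨ PySem.Str.strip p.2 = "" ∨ PySem.Str.strip p.1 = PySem.Str.strip p.2
      then none else some (PySem.Str.strip p.2, PySem.Str.strip p.1))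

-- def _dedup_sorted(vals): vals = sorted(vals, key=str.lower);
--   return [x for x, prev in zip(vals, [None] + vals) if x != prev]
def dedupSorted (vals : List String) : List String :=
  let vals := PySem.List.sorted vals (fun s => PySem.Str.lower s) false
  (vals.zip ((none : Option String) :: vals.map some)).filterMap
    (fun xp => if some xp.1 ≠ xp.2 then some xp.1 else none)

def merge_pairs_into_json_map_py_alt (pairs : List (String × String)) (existing : List (String × List String)) : List (String × List String) :=
  let contribs := pvContribs pairs existing
  -- groups = {}; for team, alias in contribs: groups.setdefault(team, []).append(alias)
  let groups := contribs.foldl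
    (fun d c => d.modify c.1 [] (fun l => l ++ [c.2])) PySem.Dict.empty
  -- {team: _dedup_sorted(lst) for team, lst in groups.items()}
  groups.items.map (fun p => (p.1, dedupSorted p.2))

-- ===== PRECONDITION & SPEC =====
-- Pre_ excludes inputs where one team receives two distinct aliases equal up to lower-casing: there
-- A orders that tie under sorted(..., key=str.lower) by set-iteration (hash) order, which is
-- accidental and varies with the hash seed.
def Pre_merge_pairs_into_json_map_py (pairs : List (String × String)) (existing : List (String × List String)) : Prop :=
  ∀ p ∈ pvContribs pairs existing, ∀ q ∈ pvContribs pairs existing,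
    p.1 = q.1 → PySem.Str.lower p.2 = PySem.Str.lower q.2 → p.2 = q.2
instance (pairs : List (String × String)) (existing : List (String × List String)) : Decidable (Pre_merge_pairs_into_json_map_py pairs existing) := by unfold Pre_merge_pairs_into_json_map_py; infer_instance

def pvWitness_merge_pairs_into_json_map_py : (List (String × String)) × (List (String × List String)) :=
  ([("NYC ", "New York"), ("Gunners", "Arsenal")], [("New York", [" N.Y. ", "", "New York"])])

def Spec_merge_pairs_into_json_map_py (pairs : List (String × String)) (existing : List (String × List String)) (out : List (String × List String)) : Prop := out = merge_pairs_into_json_map_py_alt pairs existing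
instance (pairs : List (String × String)) (existing : List (String × List String)) (out : List (String × List String)) : Decidable (Spec_merge_pairs_into_json_map_py pairs existing out) := by unfold Spec_merge_pairs_into_json_map_py; infer_instance

-- ===== CLAIM (what is proved, stated in full; the proofs are below) =====
def Claim_equal_merge_pairs_into_json_map_py : Prop := ∀ (pairs : List (String × String)) (existing : List (String × List String)), Dom_merge_pairs_into_json_map_py pairs existing → Pre_merge_pairs_into_json_map_py pairs existing → Spec_merge_pairs_into_json_map_py pairs existing (merge_pairs_into_json_map_py pairs existing)

-- ===== LEMMAS AND PROOFS =====

-- generic fold-reshaping facts (no counterpart found in Mathlib/Batteries)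
theorem pv_foldl_flatMap {α β σ : Type} (g : α → List β) (f : σ → β → σ) (l : List α) (init : σ) :
    (l.flatMap g).foldl f init = l.foldl (fun d a => (g a).foldl f d) init := by
  induction l generalizing init with
  | nil => rfl
  | cons x xs ih => simp [List.flatMap_cons, List.foldl_append, ih]

theorem pv_foldl_filterMap_if {α β σ : Type} (c : α → Prop) [DecidablePred c] (v : α → β)
    (f : σ → β → σ) (l : List α) (init : σ) :
    (l.filterMap (fun a => if c a then some (v a) else none)).foldl f init
      = l.foldl (fun d a => if c a then f d (v a) else d) init := by
  induction l generalizing init with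
  | nil => rfl
  | cons x xs ih => by_cases h : c x <;> simp [h, ih]

theorem pv_foldl_filterMap_ifn {α β σ : Type} (c : α → Prop) [DecidablePred c] (v : α → β)
    (f : σ → β → σ) (l : List α) (init : σ) :
    (l.filterMap (fun a => if c a then none else some (v a))).foldl f init
      = l.foldl (fun d a => if c a then d else f d (v a)) init := by
  induction l generalizing init with
  | nil => rfl
  | cons x xs ih => by_cases h : c x <;> simp [h, ih]

def stepA (d : PySem.Dict String (PySem.Set String)) (e : String × String) : PySem.Dict String (PySem.Set String) :=
  d.modify e.1 PySem.Set.empty (fun s => PySem.Set.add s e.2)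

def stepB (d : PySem.Dict String (List String)) (e : String × String) : PySem.Dict String (List String) :=
  d.modify e.1 [] (fun l => l ++ [e.2])

theorem A_eq_fold (pairs : List (String × String)) (existing : List (String × List String)) :
    merge_pairs_into_json_map_py pairs existing
      = ((pvContribs pairs existing).foldl stepA PySem.Dict.empty).items.map
          (fun p => (p.1, PySem.List.sorted p.2 (fun s => PySem.Str.lower s) false)) := by
  unfold merge_pairs_into_json_map_py pvContribs
  rw [List.foldl_append, pv_foldl_flatMap]
  simp only [pv_foldl_filterMap_if, pv_foldl_filterMap_ifn, stepA]

theorem getD_AB_gen (ev : List (String × String)) (dA : PySem.Dict String (PySem.Set String))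
    (dB : PySem.Dict String (List String))
    (h : ∀ k, dA.getD k [] = PySem.Set.ofList (dB.getD k [])) (k : String) :
    (ev.foldl stepA dA).getD k [] = PySem.Set.ofList ((ev.foldl stepB dB).getD k []) := by
  induction ev generalizing dA dB with
  | nil => exact h k
  | cons e t ih =>
      refine ih _ _ (fun j => ?_)
      by_cases hj : j = e.1
      · subst hj
        simp [stepA, stepB, PySem.Set.empty, h,
          PySem.Set.ofList_eq_foldl, List.foldl_append]
      · simp [stepA, stepB, PySem.Dict.getD_modify, PySem.Set.empty, hj, h]

theorem keys_A (ev : List (String × String)) :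
    (ev.foldl stepA PySem.Dict.empty).keys = PySem.Set.ofList (ev.map Prod.fst) := by
  have := PySem.Dict.keys_foldl_modify_key ev Prod.fst (PySem.Set.empty : PySem.Set String)
    (fun _ e => fun s => PySem.Set.add s e.2) PySem.Dict.empty
  simpa [stepA, PySem.Dict.keys_empty, PySem.Set.update, PySem.Set.ofList_eq_foldl] using this

theorem keys_B (ev : List (String × String)) :
    (ev.foldl stepB PySem.Dict.empty).keys = PySem.Set.ofList (ev.map Prod.fst) := by
  have := PySem.Dict.keys_foldl_modify_key ev Prod.fst ([] : List String)
    (fun _ e => fun l => l ++ [e.2]) PySem.Dict.empty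
  simpa [stepB, PySem.Dict.keys_empty, PySem.Set.update, PySem.Set.ofList_eq_foldl] using this

-- recursive form of the adjacent dedup
def daGo (p : String) : List String → List String
  | [] => []
  | y :: t => if y = p then daGo p t else y :: daGo y t

def da : List String → List String
  | [] => []
  | x :: xs => x :: daGo x xs

theorem zip_filter_eq_daGo (t : List String) (m : String) :
    (t.zip (some m :: t.map some)).filterMap
        (fun xp => if some xp.1 ≠ xp.2 then some xp.1 else none)
      = daGo m t := by
  induction t generalizing m with
  | nil => rfl
  | cons y t' ih =>
      by_cases hym : y = m
      · subst hym
        simp only [List.map_cons, List.zip_cons_cons, List.filterMap_cons, daGo]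
        simpa using ih y
      · have hne : some y ≠ some m := by simpa using hym
        simp only [List.map_cons, List.zip_cons_cons, List.filterMap_cons, daGo, if_neg hym]
        rw [if_pos hne]
        simpa using ih y

theorem dedupSorted_eq_da (l : List String) :
    dedupSorted l = da (PySem.List.sorted l (fun s => PySem.Str.lower s) false) := by
  unfold dedupSorted
  cases h : PySem.List.sorted l (fun s => PySem.Str.lower s) false with
  | nil => rfl
  | cons m t =>
      simp only [List.map_cons, List.zip_cons_cons, List.filterMap_cons, da]
      rw [if_pos (show some m ≠ (none : Option String) by simp)]
      exact congrArg (m :: ·) (zip_filter_eq_daGo t m)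

theorem mem_daGo {a p : String} {l : List String} (h : a ∈ daGo p l) : a ∈ l := by
  induction l generalizing p with
  | nil => simp [daGo] at h
  | cons y t ih =>
      by_cases hyp : y = p
      · subst hyp; rw [daGo, if_pos rfl] at h
        exact List.mem_cons_of_mem _ (ih h)
      · rw [daGo, if_neg hyp] at h
        rcases List.mem_cons.mp h with rfl | h
        · exact List.mem_cons_self
        · exact List.mem_cons_of_mem _ (ih h)

theorem mem_daGo_of_mem {a p : String} {l : List String} (h : a ∈ l) : a = p ∨ a ∈ daGo p l := by
  induction l generalizing p with
  | nil => simp at h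
  | cons y t ih =>
      rcases List.mem_cons.mp h with rfl | h
      · by_cases hyp : a = p
        · exact Or.inl hyp
        · right; rw [daGo, if_neg hyp]; exact List.mem_cons_self
      · by_cases hyp : y = p
        · subst hyp; rw [daGo, if_pos rfl]; exact ih h
        · rw [daGo, if_neg hyp]
          rcases @ih y h with rfl | h'
          · right; exact List.mem_cons_self
          · right; exact List.mem_cons_of_mem _ h'

theorem daGo_pairwise (l : List String) (p : String)
    (hs : (p :: l).Pairwise (fun a b => PySem.Str.lower a ≤ PySem.Str.lower b))
    (hC : ∀ a ∈ p :: l, ∀ b ∈ p :: l, PySem.Str.lower a = PySem.Str.lower b → a = b) :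
    (p :: daGo p l).Pairwise (fun a b => PySem.Str.lower a < PySem.Str.lower b) := by
  induction l generalizing p with
  | nil => simp [daGo]
  | cons y t ih =>
      rcases List.pairwise_cons.mp hs with ⟨hhead, htail⟩
      by_cases hyp : y = p
      · subst hyp
        rw [daGo, if_pos rfl]
        refine ih y ?_ ?_
        · exact List.pairwise_cons.mpr ⟨fun b hb => hhead b (List.mem_cons_of_mem _ hb),
            (List.pairwise_cons.mp htail).2⟩
        · intro a ha b hb
          refine hC a ?_ b ?_
          · rcases List.mem_cons.mp ha with rfl | h
            · exact List.mem_cons_self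
            · exact List.mem_cons_of_mem _ (List.mem_cons_of_mem _ h)
          · rcases List.mem_cons.mp hb with rfl | h
            · exact List.mem_cons_self
            · exact List.mem_cons_of_mem _ (List.mem_cons_of_mem _ h)
      · rw [daGo, if_neg hyp]
        have hyt : (y :: daGo y t).Pairwise (fun a b => PySem.Str.lower a < PySem.Str.lower b) :=
          ih y htail (fun a ha b hb hab =>
            hC a (List.mem_cons_of_mem _ ha) b (List.mem_cons_of_mem _ hb) hab)
        refine List.pairwise_cons.mpr ⟨?_, hyt⟩
        intro b hb
        have hpy : PySem.Str.lower p < PySem.Str.lower y := by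
          rcases lt_or_eq_of_le (hhead y List.mem_cons_self) with h | h
          · exact h
          · exact absurd (hC p List.mem_cons_self y (List.mem_cons_of_mem _ List.mem_cons_self) h)
              (Ne.symm hyp)
        rcases List.mem_cons.mp hb with rfl | hb
        · exact hpy
        · exact lt_of_lt_of_le hpy ((List.pairwise_cons.mp htail).1 b (mem_daGo hb))

theorem sorted_set_eq_da (L : List String)
    (hC : ∀ a ∈ L, ∀ b ∈ L, PySem.Str.lower a = PySem.Str.lower b → a = b) :
    PySem.List.sorted (PySem.Set.ofList L) (fun s => PySem.Str.lower s) false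
      = da (PySem.List.sorted L (fun s => PySem.Str.lower s) false) := by
  cases hM : PySem.List.sorted L (fun s => PySem.Str.lower s) false with
  | nil =>
      have hL : L = [] := (PySem.List.sorted_eq_nil_iff L _ false).mp hM
      subst hL
      exact (PySem.List.sorted_eq_nil_iff _ _ false).mpr rfl
  | cons m t =>
      have hmemM : ∀ a, a ∈ m :: t ↔ a ∈ L := by
        intro a
        rw [← hM]
        exact PySem.List.mem_sorted L _ false a
      have hCM : ∀ a ∈ m :: t, ∀ b ∈ m :: t, PySem.Str.lower a = PySem.Str.lower b → a = b :=
        fun a ha b hb => hC a ((hmemM a).mp ha) b ((hmemM b).mp hb)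
      have hsort : (m :: t).Pairwise (fun a b => PySem.Str.lower a ≤ PySem.Str.lower b) := by
        rw [← hM]; exact PySem.List.sorted_pairwise L _
      have hlt := daGo_pairwise t m hsort hCM
      have hnodup : (m :: daGo m t).Nodup :=
        hlt.imp (fun {a b} hab => fun he => by subst he; exact lt_irrefl _ hab)
      have hperm : (m :: daGo m t).Perm (PySem.Set.ofList L) := by
        rw [List.perm_ext_iff_of_nodup hnodup (PySem.Set.nodup_ofList L)]
        intro a
        rw [PySem.Set.mem_ofList]
        constructor
        · intro h
          rcases List.mem_cons.mp h with rfl | h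
          · exact (hmemM a).mp List.mem_cons_self
          · exact (hmemM a).mp (List.mem_cons_of_mem _ (mem_daGo h))
        · intro h
          rcases List.mem_cons.mp ((hmemM a).mpr h) with rfl | ht
          · exact List.mem_cons_self
          · rcases mem_daGo_of_mem (p := m) ht with rfl | h'
            · exact List.mem_cons_self
            · exact List.mem_cons_of_mem _ h'
      rw [PySem.List.sorted_eq_of_perm_of_pairwise_lt (PySem.Set.ofList L) (m :: daGo m t)
        (fun s => PySem.Str.lower s) hperm hlt]
      rfl

-- ===== VERDICT (by name: the statement is the Claim_ definition above) =====
theorem merge_pairs_into_json_map_py_spec : Claim_equal_merge_pairs_into_json_map_py := by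
  intro pairs existing hdom hpre
  unfold Spec_merge_pairs_into_json_map_py
  have hB : merge_pairs_into_json_map_py_alt pairs existing
      = ((pvContribs pairs existing).foldl stepB PySem.Dict.empty).items.map
          (fun p => (p.1, dedupSorted p.2)) := rfl
  rw [A_eq_fold, hB]
  set ev := pvContribs pairs existing with hev
  have hndA : ((ev.foldl stepA PySem.Dict.empty).keys).Nodup := by
    rw [keys_A]; exact PySem.Set.nodup_ofList _
  have hndB : ((ev.foldl stepB PySem.Dict.empty).keys).Nodup := by
    rw [keys_B]; exact PySem.Set.nodup_ofList _
  rw [PySem.Dict.items_eq_map_keys _ hndA [], PySem.Dict.items_eq_map_keys _ hndB []]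
  rw [keys_A, keys_B, List.map_map, List.map_map]
  apply List.map_congr_left
  intro k hk
  simp only [Function.comp]
  have hBk : (ev.foldl stepB PySem.Dict.empty).getD k []
      = (ev.filter (fun p => p.1 == k)).map (fun p => p.2) := by
    have := PySem.Dict.getD_foldl_modify_append ev PySem.Dict.empty k
    simpa [stepB, PySem.Dict.getD_empty] using this
  have hAk := getD_AB_gen ev PySem.Dict.empty PySem.Dict.empty (fun j => rfl) k
  have hC : ∀ a ∈ (ev.foldl stepB PySem.Dict.empty).getD k [],
      ∀ b ∈ (ev.foldl stepB PySem.Dict.empty).getD k [],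
      PySem.Str.lower a = PySem.Str.lower b → a = b := by
    intro a ha b hb hab
    rw [hBk] at ha hb
    simp only [List.mem_map, List.mem_filter] at ha hb
    rcases ha with ⟨p, ⟨hpev, hpk⟩, rfl⟩
    rcases hb with ⟨q, ⟨hqev, hqk⟩, rfl⟩
    exact hpre p hpev q hqev (by rw [beq_iff_eq] at hpk hqk; rw [hpk, hqk]) hab
  rw [hAk, sorted_set_eq_da _ hC, dedupSorted_eq_da]
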